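-- pv_equiv track=rewrite | github.com/xenoISA/isA_user | microservices/memory_service/context_ordering.py | order_by_importance_edges
-- ===== SOURCE A (Python) =====
-- from typing import Any, Dict, List
--
-- def order_by_importance_edges(
--     items: List[Dict[str, Any]],
--     importance_key: str = "importance_score",
-- ) -> List[Dict[str, Any]]:
--     """
--     Place highest-importance items at edges (start/end), lowest in middle.
--
--     Args:
--         items: List of memory dicts, each expected to have an importance field.
--         importance_key: Dict key used to read the importance score.
--             Items missing this key are treated as importance 0.
--
--     Returns:
--         A new list with the same items reordered so that the most important
--         items occupy the first and last positions, and the least important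
--         items sit in the middle.
--     """
--     if len(items) <= 1:
--         return list(items)
--
--     sorted_items = sorted(
--         items,
--         key=lambda x: x.get(importance_key, 0),
--         reverse=True,
--     )
--
--     result: List[Any] = [None] * len(sorted_items)
--     left = 0
--     right = len(sorted_items) - 1
--
--     for i, item in enumerate(sorted_items):
--         if i % 2 == 0:
--             result[left] = item
--             left += 1
--         else:
--             result[right] = item
--             right -= 1
--
--     return result
-- ===== SOURCE B (Python) =====
-- def order_by_importance_edges(items, importance_key="importance_score"):
--     sorted_items = sorted(
--         items,
--         key=lambda x: x.get(importance_key, 0),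
--         reverse=True,
--     )
--     front = sorted_items[0::2]
--     back = sorted_items[1::2]
--     return front + back[::-1]
-- ===== Notes on version B (the rewrite author's own statement) =====
-- stated objective: simpler
-- what changed: Replaces the preallocated result array with two-pointer scatter writes by a direct parity partition of the sorted list: even-indexed items form the front, odd-indexed items reversed form the back, concatenated.
import Mathlib
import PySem

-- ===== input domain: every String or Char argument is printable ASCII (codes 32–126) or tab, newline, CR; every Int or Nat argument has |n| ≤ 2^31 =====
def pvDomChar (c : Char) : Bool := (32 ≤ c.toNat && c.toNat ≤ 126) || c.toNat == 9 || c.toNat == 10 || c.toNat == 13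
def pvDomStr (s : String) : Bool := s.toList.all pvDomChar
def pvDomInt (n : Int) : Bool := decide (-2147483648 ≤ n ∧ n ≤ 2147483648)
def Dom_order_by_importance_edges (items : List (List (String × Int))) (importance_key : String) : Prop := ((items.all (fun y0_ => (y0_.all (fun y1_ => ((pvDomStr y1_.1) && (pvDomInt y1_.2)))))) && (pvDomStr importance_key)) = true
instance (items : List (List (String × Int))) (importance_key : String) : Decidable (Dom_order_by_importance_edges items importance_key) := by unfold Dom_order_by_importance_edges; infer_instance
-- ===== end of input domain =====

-- B replaces A's preallocated-array two-pointer scatter by a direct parity partition of the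
-- sorted list (even-indexed slice + reversed odd-indexed slice); objective: simpler.

-- ===== PORT A =====
-- the for-loop over enumerate(sorted_items) with state (result, left, right);
-- result : List (Option _) models the [None]*n list, filled by List.set
def order_by_importance_edges (items : List (List (String × Int))) (importance_key : String) : List (List (String × Int)) :=
  if items.length ≤ 1 then items
  else
    let sorted_items := PySem.List.sorted items (fun x => PySem.Dict.getD (PySem.Dict.mk x) importance_key (0 : Int)) true
    let n := sorted_items.length
    let st := (PySem.List.enumerate sorted_items 0).foldl
      (fun (st : List (Option (List (String × Int))) × Nat × Nat) p =>
        if PySem.Int.mod p.1 2 == 0 then (st.1.set st.2.1 (some p.2), st.2.1 + 1, st.2.2)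
        else (st.1.set st.2.2 (some p.2), st.2.1, st.2.2 - 1))
      (List.replicate n none, 0, n - 1)
    st.1.map (fun o => o.getD [])

-- ===== PORT B =====
def order_by_importance_edges_alt (items : List (List (String × Int))) (importance_key : String) : List (List (String × Int)) :=
  let sorted_items := PySem.List.sorted items (fun x => PySem.Dict.getD (PySem.Dict.mk x) importance_key (0 : Int)) true
  let front := (PySem.List.slice? sorted_items (some 0) none 2).getD []
  let back := (PySem.List.slice? sorted_items (some 1) none 2).getD []
  front ++ (PySem.List.slice? back none none (-1)).getD []

-- ===== PRECONDITION & SPEC =====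
def Spec_order_by_importance_edges (items : List (List (String × Int))) (importance_key : String) (out : List (List (String × Int))) : Prop := out = order_by_importance_edges_alt items importance_key
instance (items : List (List (String × Int))) (importance_key : String) (out : List (List (String × Int))) : Decidable (Spec_order_by_importance_edges items importance_key out) := by unfold Spec_order_by_importance_edges; infer_instance

-- ===== CLAIM (what is proved, stated in full; the proofs are below) =====
def Claim_equal_order_by_importance_edges : Prop := ∀ (items : List (List (String × Int))) (importance_key : String), Dom_order_by_importance_edges items importance_key → Spec_order_by_importance_edges items importance_key (order_by_importance_edges items importance_key)

-- ===== LEMMAS AND PROOFS =====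

-- even-indexed / odd-indexed elements of a list
def pvEvens {α : Type} : List α → List α
  | [] => []
  | [x] => [x]
  | x :: _ :: t => x :: pvEvens t

def pvOdds {α : Type} : List α → List α
  | [] => []
  | [_] => []
  | _ :: y :: t => y :: pvOdds t

theorem pvOdds_cons {α : Type} (x : α) (t : List α) : pvOdds (x :: t) = pvEvens t := by
  induction t using pvEvens.induct generalizing x with
  | case1 => rfl
  | case2 y => rfl
  | case3 y z tt ih => simp [pvOdds, pvEvens, ih]

theorem filterMap_range_evens {α : Type} (xs : List α) :
    List.filterMap (fun k => xs[2 * k]?) (List.range ((xs.length + 1) / 2)) = pvEvens xs := by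
  induction xs using pvEvens.induct with
  | case1 => simp [pvEvens]
  | case2 x => simp [pvEvens, List.range_succ]
  | case3 x y t ih =>
    have hlen : ((x :: y :: t).length + 1) / 2 = (t.length + 1) / 2 + 1 := by
      simp only [List.length_cons]; omega
    rw [hlen, List.range_succ_eq_map, List.filterMap_cons, List.filterMap_map]
    have h0 : (x :: y :: t)[2 * 0]? = some x := rfl
    rw [h0]
    have hfun : ((fun k => (x :: y :: t)[2 * k]?) ∘ Nat.succ) = (fun k => t[2 * k]?) := by
      funext k
      have : 2 * Nat.succ k = 2 * k + 1 + 1 := by omega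
      simp [this]
    rw [hfun, ih]
    rfl

theorem slice2_front {α : Type} (xs : List α) :
    PySem.List.slice? xs (some 0) none 2 = some (pvEvens xs) := by
  rw [← filterMap_range_evens]
  simp only [PySem.List.slice?, PySem.List.sliceIndices]
  norm_num
  rw [show (if 0 < xs.length then (((xs.length : Int) + 2 - 1) / 2).toNat else 0) = (xs.length + 1) / 2 by split <;> omega]
  apply List.filterMap_congr
  intro k _
  rw [show (2 * (k : Int)).toNat = 2 * k by omega]

theorem slice2_back {α : Type} (xs : List α) :
    PySem.List.slice? xs (some 1) none 2 = some (pvOdds xs) := by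
  cases xs with
  | nil => rfl
  | cons x t =>
    rw [pvOdds_cons, ← filterMap_range_evens]
    simp only [PySem.List.slice?, PySem.List.sliceIndices]
    norm_num
    rw [show (if 0 < t.length then (((t.length : Int) + 2 - 1) / 2).toNat else 0) = (t.length + 1) / 2 by split <;> omega]
    apply List.filterMap_congr
    intro k _
    rw [show ((1 : Int) + 2 * (k : Int)).toNat = 2 * k + 1 by omega]
    rfl

-- the loop body of A's scatter fold
def pvBody {α : Type} (st : List (Option α) × Nat × Nat) (p : Int × α) : List (Option α) × Nat × Nat :=
  if PySem.Int.mod p.1 2 == 0 then (st.1.set st.2.1 (some p.2), st.2.1 + 1, st.2.2)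
  else (st.1.set st.2.2 (some p.2), st.2.1, st.2.2 - 1)

theorem pvMod_even (k : Nat) : PySem.Int.mod (2 * (k : Int)) 2 = 0 := by
  simp [PySem.Int.mod]

theorem pvMod_odd (k : Nat) : PySem.Int.mod (2 * (k : Int) + 1) 2 = 1 := by
  simp [PySem.Int.mod]

-- set at the boundary of an append
theorem pvSet_mid {α : Type} (l1 l2 : List α) (m : α) (v : α) :
    (l1 ++ m :: l2).set l1.length v = l1 ++ v :: l2 := by
  rw [List.set_append]
  simp

-- A's scatter loop, started on a region 'mid' framed by already-written pre/suf,
-- fills it with evens-in-front, odds-reversed-in-back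
theorem pvScatter_inv {α : Type} (t : List α) (k : Nat) (pre suf : List α)
    (mid : List (Option α)) (hm : mid.length = t.length) :
    ((PySem.List.enumerate t (2 * (k : Int))).foldl pvBody
      (pre.map some ++ mid ++ suf.map some, pre.length, pre.length + mid.length - 1)).1
    = (pre ++ (pvEvens t ++ (pvOdds t).reverse) ++ suf).map some := by
  induction t using pvEvens.induct generalizing k pre suf mid with
  | case1 =>
    have : mid = [] := by simpa using hm
    subst this
    simp [PySem.List.enumerate, pvEvens, pvOdds]
  | case2 x =>
    match mid, hm with
    | [m], _ =>
      rw [PySem.List.enumerate_cons, PySem.List.enumerate_nil]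
      simp only [List.foldl_cons, List.foldl_nil, pvBody, pvMod_even]
      rw [show (pre.map some ++ [m] ++ suf.map some) = (pre.map some ++ m :: suf.map some) by simp]
      rw [show pre.length = (pre.map some).length by simp]
      rw [pvSet_mid]
      simp [pvEvens, pvOdds]
  | case3 x y tt ih =>
    match mid, hm with
    | m0 :: mrest, hm =>
      have hmr : mrest.length = tt.length + 1 := by simpa using hm
      rcases List.eq_nil_or_concat mrest with h | ⟨ms, mlast, rfl⟩
      · subst h; simp at hmr
      rw [PySem.List.enumerate_cons, PySem.List.enumerate_cons]
      simp only [List.foldl_cons]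
      -- first step: even index writes x at position pre.length
      have step1 : pvBody (pre.map some ++ m0 :: (ms.concat mlast) ++ suf.map some, pre.length,
          pre.length + (m0 :: ms.concat mlast).length - 1) ((2 * (k : Int), x))
          = (pre.map some ++ some x :: (ms.concat mlast) ++ suf.map some, pre.length + 1,
             pre.length + (m0 :: ms.concat mlast).length - 1) := by
        simp only [pvBody, pvMod_even]
        norm_num
      have step2 : pvBody (pre.map some ++ some x :: (ms.concat mlast) ++ suf.map some, pre.length + 1,
          pre.length + (m0 :: ms.concat mlast).length - 1) ((2 * (k : Int) + 1, y))
          = ((pre.map some ++ [some x]) ++ ms ++ ((y :: suf).map some), pre.length + 1,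
             pre.length + (m0 :: ms.concat mlast).length - 2) := by
        simp only [pvBody, pvMod_odd]
        norm_num
        omega
      rw [show ((m0 :: ms.concat mlast) : List (Option α)) = m0 :: (ms.concat mlast) from rfl] at *
      rw [step1, step2]
      have hrw : (2 * (k : Int) + 1 + 1) = 2 * ((k + 1 : Nat) : Int) := by push_cast; ring
      rw [hrw]
      have hlen2 : pre.length + (m0 :: ms.concat mlast).length - 2
          = (pre ++ [x]).length + ms.length - 1 := by simp; omega
      have hlen1 : pre.length + 1 = (pre ++ [x]).length := by simp
      rw [hlen1, hlen2]
      rw [show (pre.map some ++ [some x]) = (pre ++ [x]).map some by simp]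
      rw [ih (k + 1) (pre ++ [x]) (y :: suf) ms (by simpa using hmr)]
      simp [pvEvens, pvOdds]

-- sorted of a short list is itself
theorem pvSorted_short {α : Type} (xs : List α) (key : α → Int) (h : xs.length ≤ 1) :
    PySem.List.sorted xs key true = xs := by
  apply PySem.List.sorted_rev_eq_self_of_pairwise
  match xs, h with
  | [], _ => simp
  | [x], _ => simp

-- ===== VERDICT (by name: the statement is the Claim_ definition above) =====
theorem order_by_importance_edges_spec : Claim_equal_order_by_importance_edges := by
  intro items importance_key _
  unfold Spec_order_by_importance_edges order_by_importance_edges order_by_importance_edges_alt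
  simp only [slice2_front, slice2_back, PySem.List.slice?_none_none_neg_one, Option.getD_some]
  by_cases h : items.length ≤ 1
  · rw [if_pos h, pvSorted_short items _ h]
    match items, h with
    | [], _ => rfl
    | [x], _ => rfl
  · rw [if_neg h]
    have hlen : (PySem.List.sorted items (fun x => PySem.Dict.getD (PySem.Dict.mk x) importance_key (0 : Int)) true).length = items.length :=
      PySem.List.length_sorted ..
    set s := PySem.List.sorted items (fun x => PySem.Dict.getD (PySem.Dict.mk x) importance_key (0 : Int)) true with hs
    have key := pvScatter_inv s 0 [] [] (List.replicate s.length none) (by simp)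
    simp only [List.map_nil, List.nil_append, List.append_nil, List.length_nil,
      List.length_replicate, Nat.zero_add] at key
    have : ((PySem.List.enumerate s 0).foldl pvBody
        (List.replicate s.length none, 0, s.length - 1)).1
        = (pvEvens s ++ (pvOdds s).reverse).map some := by
      rw [show ((0 : Int)) = 2 * ((0 : Nat) : Int) by norm_num]
      exact key
    rw [show (fun (st : List (Option (List (String × Int))) × Nat × Nat) (p : Int × List (String × Int)) =>
          if PySem.Int.mod p.1 2 == 0 then (st.1.set st.2.1 (some p.2), st.2.1 + 1, st.2.2)
          else (st.1.set st.2.2 (some p.2), st.2.1, st.2.2 - 1)) = pvBody from rfl]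
    rw [this]
    simp
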